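-- pv_equiv track=rewrite | github.com/MrGmo/codeWars-Python | 7kyu/counting-in-the-amazon.py | count_arara
-- ===== SOURCE A (Python) =====
-- def count_arara(n):
--     obj = {
--         1:'anane',
--         2:'adak'
--     }
--     result = ''
--     start = 0
--     while n != start:
--         if n > 1:
--             result += obj.get(2) + ' '
--             n -= 2
--         else:
--             result += obj.get(1) + ' '
--             n -= 1
--     return result.strip()
-- ===== SOURCE B (Python) =====
-- def count_arara(n):
--     words = ['adak'] * (n // 2)
--     if n % 2:
--         words.append('anane')
--     return ' '.join(words)
-- ===== Notes on version B (the rewrite author's own statement) =====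
-- stated objective: faster
-- what changed: Replaces the word-by-word subtraction loop with a closed form: floor-half of n 'adak' words plus one trailing 'anane' iff n is odd, joined with single spaces.
import Mathlib
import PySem

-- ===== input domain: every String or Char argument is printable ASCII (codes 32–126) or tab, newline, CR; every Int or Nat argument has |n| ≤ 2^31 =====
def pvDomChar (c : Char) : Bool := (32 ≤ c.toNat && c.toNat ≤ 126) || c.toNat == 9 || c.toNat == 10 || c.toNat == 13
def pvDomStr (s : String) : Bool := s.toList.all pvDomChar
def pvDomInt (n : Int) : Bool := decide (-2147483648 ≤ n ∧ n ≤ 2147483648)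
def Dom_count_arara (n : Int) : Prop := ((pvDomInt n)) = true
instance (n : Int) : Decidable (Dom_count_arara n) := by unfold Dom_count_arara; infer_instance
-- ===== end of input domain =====

-- B replaces A's subtract-and-concatenate loop by a closed form (floor-half of n 'adak' words, one 'anane' iff n odd, joined); measurably faster on large n.


-- ===== PORT A =====
-- Python's while loop: result accumulated as a char list (PySem string functions are defined on List Char).
-- The final 'else result' arm is unreachable under Pre_ (0 ≤ n): Python loops forever on negative n.
def count_arara_loop (n : Int) (result : List Char) : List Char :=
  if n = 0 then result
  else if 1 < n then count_arara_loop (n - 2) (result ++ "adak ".toList)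
  else if 0 < n then count_arara_loop (n - 1) (result ++ "anane ".toList)
  else result
termination_by n.toNat
decreasing_by all_goals omega

def count_arara (n : Int) : String :=
  String.ofList (PySem.Chars.strip (count_arara_loop n []))

-- ===== PORT B =====
def count_arara_alt (n : Int) : String :=
  let words := PySem.List.pyRepeat ["adak"] (PySem.Int.floordiv n 2)
  let words := if PySem.Int.mod n 2 ≠ 0 then words ++ ["anane"] else words
  PySem.Str.join " " words

-- ===== PRECONDITION & SPEC =====
-- Pre_ excludes negative n, on which A's while loop never terminates (Python hangs; B returns a value there).
def Pre_count_arara (n : Int) : Prop := 0 ≤ n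
instance (n : Int) : Decidable (Pre_count_arara n) := by unfold Pre_count_arara; infer_instance
def pvWitness_count_arara : Int := (5)
def Spec_count_arara (n : Int) (out : String) : Prop := out = count_arara_alt n
instance (n : Int) (out : String) : Decidable (Spec_count_arara n out) := by unfold Spec_count_arara; infer_instance

-- ===== CLAIM (what is proved, stated in full; the proofs are below) =====
def Claim_equal_count_arara : Prop := ∀ (n : Int), Dom_count_arara n → Pre_count_arara n → Spec_count_arara n (count_arara n)

-- ===== LEMMAS AND PROOFS =====

-- flat left part produced by k iterations of the 'adak' branch
def repChunk : Nat → List Char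
  | 0 => []
  | k + 1 => "adak ".toList ++ repChunk k

def tailChunk (odd : Bool) : List Char := if odd then "anane ".toList else []

def wordsOf (k : Nat) (odd : Bool) : List (List Char) :=
  List.replicate k "adak".toList ++ (if odd then ["anane".toList] else [])

lemma count_arara_loop_eq (m : Nat) : ∀ acc : List Char,
    count_arara_loop (m : Int) acc = acc ++ repChunk (m / 2) ++ tailChunk (m % 2 == 1) := by
  induction m using Nat.strong_induction_on with
  | _ m ih =>
    intro acc
    match m, ih with
    | 0, _ => simp [count_arara_loop, repChunk, tailChunk]
    | 1, _ => simp [count_arara_loop, repChunk, tailChunk]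
    | (k + 2), ih =>
      rw [count_arara_loop]
      have h2 : ((k + 2 : Nat) : Int) - 2 = ((k : Nat) : Int) := by push_cast; ring
      have hk2 : (k + 2) / 2 = k / 2 + 1 := by omega
      have hm2 : (k + 2) % 2 = k % 2 := by omega
      simp only [show ¬((k + 2 : Nat) : Int) = 0 by exact_mod_cast (by omega : ¬(k + 2 : Int) = 0),
        show (1 : Int) < ((k + 2 : Nat) : Int) by exact_mod_cast (by omega : (1 : Int) < (k + 2 : Int)),
        if_true, if_false, h2]
      rw [ih k (by omega) (acc ++ "adak ".toList), hk2, hm2]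
      simp [repChunk]

lemma wordsOf_ne_nil (k : Nat) (odd : Bool) (h : k ≠ 0 ∨ odd = true) : wordsOf k odd ≠ [] := by
  unfold wordsOf
  rcases h with h | h
  · cases k with
    | zero => omega
    | succ k => simp [List.replicate]
  · simp [h]

lemma join_wordsOf_append_space (k : Nat) (odd : Bool) (h : k ≠ 0 ∨ odd = true) :
    PySem.Chars.join [' '] (wordsOf k odd) ++ [' '] = repChunk k ++ tailChunk odd := by
  induction k with
  | zero =>
    rcases h with h | h
    · omega
    · subst h; simp only [wordsOf, repChunk, tailChunk, PySem.Chars.join]; decide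
  | succ k ih =>
    by_cases hk : k = 0 ∧ odd = false
    · obtain ⟨hk0, hodd⟩ := hk
      subst hk0; subst hodd
      simp only [wordsOf, repChunk, tailChunk, PySem.Chars.join]; decide
    · have h' : k ≠ 0 ∨ odd = true := by
        rcases Bool.eq_false_or_eq_true odd with ho | ho
        · exact Or.inr ho
        · left; intro hk0; exact hk ⟨hk0, ho⟩
      have hne := wordsOf_ne_nil k odd h'
      have hcons : wordsOf (k + 1) odd = "adak".toList :: wordsOf k odd := by
        simp [wordsOf, List.replicate]
      rw [hcons]
      cases hw : wordsOf k odd with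
      | nil => exact absurd hw hne
      | cons w ws =>
        rw [show PySem.Chars.join [' '] ("adak".toList :: w :: ws)
              = "adak".toList ++ [' '] ++ PySem.Chars.join [' '] (w :: ws) by
            simp [PySem.Chars.join, List.intercalate]]
        rw [← hw]
        have := ih h'
        rw [show repChunk (k + 1) = "adak ".toList ++ repChunk k from rfl]
        simp only [List.append_assoc]
        rw [show ("adak".toList : List Char) ++ ([' '] ++ (PySem.Chars.join [' '] (wordsOf k odd) ++ [' ']))
              = "adak ".toList ++ (PySem.Chars.join [' '] (wordsOf k odd) ++ [' ']) by simp]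
        rw [this]

lemma join_wordsOf_head (k : Nat) (odd : Bool) (h : k ≠ 0 ∨ odd = true) :
    ∃ r, PySem.Chars.join [' '] (wordsOf k odd) = 'a' :: r := by
  cases k with
  | zero =>
    rcases h with h | h
    · omega
    · subst h; exact ⟨"nane".toList, by simp only [wordsOf, PySem.Chars.join]; decide⟩
  | succ k =>
    have hcons : wordsOf (k + 1) odd = "adak".toList :: wordsOf k odd := by
      simp [wordsOf, List.replicate]
    cases hw : wordsOf k odd with
    | nil =>
      refine ⟨"dak".toList, ?_⟩
      rw [hcons, hw]; simp only [PySem.Chars.join]; decide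
    | cons w ws =>
      refine ⟨"dak".toList ++ [' '] ++ PySem.Chars.join [' '] (w :: ws), ?_⟩
      rw [hcons, hw]
      simp [PySem.Chars.join, List.intercalate]

lemma join_wordsOf_last (k : Nat) (odd : Bool) (h : k ≠ 0 ∨ odd = true) :
    (PySem.Chars.join [' '] (wordsOf k odd)).getLast? = some 'k'
      ∨ (PySem.Chars.join [' '] (wordsOf k odd)).getLast? = some 'e' := by
  induction k with
  | zero =>
    rcases h with h | h
    · omega
    · subst h; right; simp only [wordsOf, PySem.Chars.join]; decide
  | succ k ih =>
    have hcons : wordsOf (k + 1) odd = "adak".toList :: wordsOf k odd := by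
      simp [wordsOf, List.replicate]
    by_cases hk : k = 0 ∧ odd = false
    · obtain ⟨hk0, hodd⟩ := hk; subst hk0; subst hodd
      left; simp only [wordsOf, PySem.Chars.join]; decide
    · have h' : k ≠ 0 ∨ odd = true := by
        rcases Bool.eq_false_or_eq_true odd with ho | ho
        · exact Or.inr ho
        · left; intro hk0; exact hk ⟨hk0, ho⟩
      obtain ⟨r, hr⟩ := join_wordsOf_head k odd h'
      cases hw : wordsOf k odd with
      | nil => exact absurd hw (wordsOf_ne_nil k odd h')
      | cons w ws =>
        rw [hcons, hw,
          show PySem.Chars.join [' '] ("adak".toList :: w :: ws)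
              = "adak".toList ++ [' '] ++ PySem.Chars.join [' '] (w :: ws) by
            simp [PySem.Chars.join, List.intercalate]]
        rw [← hw, hr]
        rw [List.getLast?_append]
        have h2 := ih h'
        rw [hr] at h2
        rcases h2 with h2 | h2
        · left; rw [h2]; rfl
        · right; rw [h2]; rfl

lemma strip_wrap (w : List Char) (r : List Char) (hw : w = 'a' :: r)
    (hl : w.getLast? = some 'k' ∨ w.getLast? = some 'e') :
    PySem.Chars.strip (w ++ [' ']) = w := by
  subst hw
  unfold PySem.Chars.strip PySem.Chars.lstrip PySem.Chars.rstrip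
  rw [show (('a' :: r) ++ [' ']) = 'a' :: (r ++ [' ']) from rfl]
  rw [List.dropWhile_cons_of_neg (by decide)]
  rw [show ('a' :: (r ++ [' '])).reverse = ' ' :: ('a' :: r).reverse by simp]
  rw [List.dropWhile_cons_of_pos (by decide)]
  have hhead : ∃ c t, ('a' :: r).reverse = c :: t ∧ PySem.Chars.isspace c = false := by
    have : ('a' :: r).reverse.head? = ('a' :: r).getLast? := by
      rw [List.head?_reverse]
    cases hrev : ('a' :: r).reverse with
    | nil => simp at hrev
    | cons c t =>
      refine ⟨c, t, rfl, ?_⟩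
      rw [hrev] at this
      simp at this
      rcases hl with hl | hl <;> rw [hl] at this <;> simp_all <;> decide
  obtain ⟨c, t, hct, hc⟩ := hhead
  rw [hct, List.dropWhile_cons_of_neg (by simp [hc]), ← hct, List.reverse_reverse]

lemma count_arara_alt_eq (k : Nat) (odd : Bool) (n : Int)
    (hk : n / 2 = (k : Int)) (ho : (n % 2 == 1) = odd) :
    count_arara_alt n = PySem.Str.join " " (List.replicate k "adak"
        ++ (if odd then ["anane"] else [])) := by
  show PySem.Str.join " " (if PySem.Int.mod n 2 ≠ 0
      then PySem.List.pyRepeat ["adak"] (PySem.Int.floordiv n 2) ++ ["anane"]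
      else PySem.List.pyRepeat ["adak"] (PySem.Int.floordiv n 2)) = _
  rw [PySem.Int.floordiv_eq_ediv_of_pos (by norm_num), PySem.Int.mod_eq_emod_of_pos (by norm_num)]
  rw [PySem.List.pyRepeat_singleton, hk]
  have hmod : (n % 2 ≠ 0) ↔ (odd = true) := by
    rw [← ho]; constructor
    · intro h; simp only [beq_iff_eq]; omega
    · intro h; simp only [beq_iff_eq] at h; omega
  by_cases hodd : odd = true
  · rw [if_pos (hmod.mpr hodd), hodd]; simp
  · rw [if_neg (by simp [hmod, hodd]), if_neg hodd]; simp

lemma words_map_toList (k : Nat) (odd : Bool) :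
    (List.replicate k "adak" ++ (if odd then ["anane"] else [])).map String.toList
      = wordsOf k odd := by
  unfold wordsOf
  cases odd <;> simp [List.map_replicate]

-- ===== VERDICT (by name: the statement is the Claim_ definition above) =====
theorem count_arara_spec : Claim_equal_count_arara := by
  intro n _ hpre
  unfold Spec_count_arara
  have hn0 : 0 ≤ n := hpre
  obtain ⟨m, rfl⟩ : ∃ m : Nat, n = (m : Int) := ⟨n.toNat, (Int.toNat_of_nonneg hn0).symm⟩
  by_cases hm : m = 0
  · subst hm
    have hA0 : count_arara ((0 : Nat) : Int) = String.ofList [] := by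
      unfold count_arara
      rw [count_arara_loop_eq 0 []]
      exact congrArg String.ofList (by decide)
    have hB0 : count_arara_alt ((0 : Nat) : Int) = String.ofList [] := by
      unfold count_arara_alt
      exact congrArg String.ofList (by decide)
    rw [hA0, hB0]
  · -- m ≥ 1
    set k : Nat := m / 2 with hk
    set odd : Bool := (m % 2 == 1) with hodd
    have hker : k ≠ 0 ∨ odd = true := by
      by_cases h2 : m % 2 = 1
      · right; rw [hodd]; simp [h2]
      · left; rw [hk]; omega
    have hA : count_arara (m : Int) = String.ofList (PySem.Chars.join [' '] (wordsOf k odd)) := by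
      unfold count_arara
      rw [count_arara_loop_eq m []]
      rw [List.nil_append, ← join_wordsOf_append_space k odd hker]
      obtain ⟨r, hr⟩ := join_wordsOf_head k odd hker
      rw [strip_wrap _ r hr (join_wordsOf_last k odd hker)]
    rw [hA]
    have hdiv : ((m : Int)) / 2 = ((k : Int)) := by rw [hk]; omega
    have hmod : (((m : Int)) % 2 == 1) = odd := by
      rw [hodd]
      rcases Nat.even_or_odd m with he | ho
      · have h1 : (m : Int) % 2 = 0 := by obtain ⟨t, ht⟩ := he; omega
        have h2 : m % 2 = 0 := by omega
        simp [h1, h2]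
      · have h2 : m % 2 = 1 := Nat.odd_iff.mp ho
        have h1 : (m : Int) % 2 = 1 := by omega
        simp [h1, h2]
    rw [count_arara_alt_eq k odd (m : Int) hdiv hmod]
    show String.ofList (PySem.Chars.join [' '] (wordsOf k odd))
        = String.ofList (PySem.Chars.join " ".toList
            ((List.replicate k "adak" ++ (if odd then ["anane"] else [])).map String.toList))
    rw [words_map_toList, show (" ".toList : List Char) = [' '] from by decide]
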